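-- pv_equiv track=rewrite | github.com/willp618/meshbot-warn | old/wxwarn parts.py | abbreviate_description
-- ===== SOURCE A (Python) =====
-- def abbreviate_description(text, max_length=180):
--     replacements = {
--         "weather warning": "WX warn",
--         "heavy rainfall": "hvyrain",
--         "possible disruption": "disruption",
--         "localised flooding": "flooding",
--         "take care when travelling": "drive safe",
--         "public transport": "transit",
--         "homes and businesses": "properties",
--         "Yellow warning": "Y-Warn",
--         "Amber warning": "Amb-Warn",
--         "Red warning": "Red-Warn",
--         "West Midlands": "W Mids",
--         "Herefordshire": "Heref",
--         "Shropshire": "Salop",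
--         "Worcestershire": "Worcs"
--     }
--
--     for full, abbr in replacements.items():
--         text = text.replace(full, abbr)
--
--     return text if len(text) <= max_length else text[:max_length].rstrip() + "..."
-- ===== SOURCE B (Python) =====
-- _TABLE = [
--     ("weather warning", "WX warn"),
--     ("heavy rainfall", "hvyrain"),
--     ("possible disruption", "disruption"),
--     ("localised flooding", "flooding"),
--     ("take care when travelling", "drive safe"),
--     ("public transport", "transit"),
--     ("homes and businesses", "properties"),
--     ("Yellow warning", "Y-Warn"),
--     ("Amber warning", "Amb-Warn"),
--     ("Red warning", "Red-Warn"),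
--     ("West Midlands", "W Mids"),
--     ("Herefordshire", "Heref"),
--     ("Shropshire", "Salop"),
--     ("Worcestershire", "Worcs"),
-- ]
--
--
-- def abbreviate_description(text, max_length=180):
--     # single left-to-right scan: at each position emit the first table entry that
--     # matches (skipping past it), otherwise copy one character
--     out = []
--     i = 0
--     n = len(text)
--     while i < n:
--         for full, abbr in _TABLE:
--             if text.startswith(full, i):
--                 out.append(abbr)
--                 i += len(full)
--                 break
--         else:
--             out.append(text[i])
--             i += 1
--     result = "".join(out)
--     if len(result) <= max_length:
--         return result
--     cut = result[:max_length]
--     while cut and cut[-1].isspace():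
--         cut = cut[:-1]
--     return cut + "..."
-- ===== Notes on version B (the rewrite author's own statement) =====
-- stated objective: alternative
-- what changed: The 14 sequential full-string .replace passes are replaced by ONE explicit left-to-right scan with an output accumulator (emit the first matching key at each position, else copy a character) and the final rstrip is a manual pop-last-whitespace loop.
import Mathlib
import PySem

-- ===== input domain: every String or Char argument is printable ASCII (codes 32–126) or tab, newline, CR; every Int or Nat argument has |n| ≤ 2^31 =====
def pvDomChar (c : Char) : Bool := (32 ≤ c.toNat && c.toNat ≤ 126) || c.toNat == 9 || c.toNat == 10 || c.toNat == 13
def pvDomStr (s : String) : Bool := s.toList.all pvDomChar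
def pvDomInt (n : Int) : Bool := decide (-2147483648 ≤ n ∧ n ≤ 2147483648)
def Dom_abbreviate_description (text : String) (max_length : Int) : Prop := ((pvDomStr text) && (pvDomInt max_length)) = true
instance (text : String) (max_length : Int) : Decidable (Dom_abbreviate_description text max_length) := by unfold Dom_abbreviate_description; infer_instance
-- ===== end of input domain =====

-- B replaces A's 14 sequential full-string .replace passes by ONE explicit left-to-right scan
-- with an output accumulator (first matching key at each position) followed by a manual
-- strip-trailing-whitespace loop; equivalence is about the return value only.

-- ===== PORT A =====
-- replacements dict of A, in insertion order
def abbrevTable : List (List Char × List Char) :=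
  [("weather warning".toList, "WX warn".toList),
   ("heavy rainfall".toList, "hvyrain".toList),
   ("possible disruption".toList, "disruption".toList),
   ("localised flooding".toList, "flooding".toList),
   ("take care when travelling".toList, "drive safe".toList),
   ("public transport".toList, "transit".toList),
   ("homes and businesses".toList, "properties".toList),
   ("Yellow warning".toList, "Y-Warn".toList),
   ("Amber warning".toList, "Amb-Warn".toList),
   ("Red warning".toList, "Red-Warn".toList),
   ("West Midlands".toList, "W Mids".toList),
   ("Herefordshire".toList, "Heref".toList),
   ("Shropshire".toList, "Salop".toList),
   ("Worcestershire".toList, "Worcs".toList)]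

-- for full, abbr in replacements.items(): text = text.replace(full, abbr)
-- return text if len(text) <= max_length else text[:max_length].rstrip() + "..."
def abbreviate_description (text : String) (max_length : Int) : String :=
  let t := abbrevTable.foldl (fun s p => PySem.Chars.replace s p.1 p.2) text.toList
  if (t.length : Int) ≤ max_length then String.ofList t
  else String.ofList (PySem.Chars.rstrip (PySem.List.slice t none (some max_length)) ++ "...".toList)

-- ===== PORT B =====
-- Source B's table: a list of (full, abbr) string pairs
def bTable : List (String × String) :=
  [("weather warning", "WX warn"),
   ("heavy rainfall", "hvyrain"),
   ("possible disruption", "disruption"),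
   ("localised flooding", "flooding"),
   ("take care when travelling", "drive safe"),
   ("public transport", "transit"),
   ("homes and businesses", "properties"),
   ("Yellow warning", "Y-Warn"),
   ("Amber warning", "Amb-Warn"),
   ("Red warning", "Red-Warn"),
   ("West Midlands", "W Mids"),
   ("Herefordshire", "Heref"),
   ("Shropshire", "Salop"),
   ("Worcestershire", "Worcs")]

-- the for/else over the table: first entry whose key starts at the current position
-- (text.startswith(full, i)); returns the abbreviation and the remainder after the key
def tryKeys : List (String × String) → List Char → Option (String × List Char)
  | [], _ => none
  | (full, abbr) :: rest, l =>
    if full.toList.isPrefixOf l then some (abbr, l.drop full.toList.length)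
    else tryKeys rest l

-- termination helper for the while-loop scan, cited by scanGo's decreasing_by
theorem tryKeys_some_len {tbl : List (String × String)} {l : List Char} {a : String}
    {r : List Char} (hne : ∀ p ∈ tbl, p.1.toList ≠ []) (h : tryKeys tbl l = some (a, r)) :
    r.length < l.length := by
  induction tbl with
  | nil => simp [tryKeys] at h
  | cons p rest ih =>
    obtain ⟨full, abbr⟩ := p
    simp only [tryKeys] at h
    split at h
    · rename_i hpre
      rw [Option.some.injEq, Prod.mk.injEq] at h
      obtain ⟨rfl, rfl⟩ := h
      have hk : full.toList ≠ [] := hne (full, abbr) (by simp)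
      have hlen : full.toList.length ≤ l.length := (List.isPrefixOf_iff_prefix.mp hpre).length_le
      have : 0 < full.toList.length := List.length_pos_iff.mpr hk
      simp only [List.length_drop]
      omega
    · exact ih (fun p hp => hne p (by simp [hp])) h

-- the while i < n loop of Source B: out accumulates emitted pieces (kept reversed), i advances
-- past a matched key or one character; "".join(out) is the final reverse
def scanGo (l : List Char) (acc : List Char) : List Char :=
  match h : tryKeys bTable l with
  | some (abbr, rest) => scanGo rest (abbr.toList.reverse ++ acc)
  | none =>
    match l with
    | [] => acc.reverse
    | c :: t => scanGo t (c :: acc)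
termination_by l.length
decreasing_by
  · exact tryKeys_some_len (by decide) h
  · simp

-- while cut and cut[-1].isspace(): cut = cut[:-1]
def rstripLoop (l : List Char) : List Char :=
  match h : l.getLast? with
  | some c => if PySem.Chars.isspace c then rstripLoop l.dropLast else l
  | none => l
termination_by l.length
decreasing_by
  have hne : l ≠ [] := by intro he; subst he; simp at h
  have := List.length_pos_iff.mpr hne
  simp only [List.length_dropLast]
  omega

def abbreviate_description_alt (text : String) (max_length : Int) : String :=
  let result := scanGo text.toList []
  if (result.length : Int) ≤ max_length then String.ofList result
  else String.ofList (rstripLoop (PySem.List.slice result none (some max_length)) ++ ['.', '.', '.'])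

-- ===== PRECONDITION & SPEC =====
-- Pre_ excludes texts containing the one collision substring on which two replacement keys overlap
-- ("public transport" overlapping "take care when travelling"): there A's fixed pass order and B's
-- leftmost single pass pick different, equally defensible replacements.
def Pre_abbreviate_description (text : String) (max_length : Int) : Prop :=
  PySem.Str.isIn "public transportake care when travelling" text = false
instance (text : String) (max_length : Int) : Decidable (Pre_abbreviate_description text max_length) := by
  unfold Pre_abbreviate_description; infer_instance

def pvWitness_abbreviate_description : String × Int :=
  ("Amber warning of heavy rainfall across the West Midlands and Herefordshire", 40)

def Spec_abbreviate_description (text : String) (max_length : Int) (out : String) : Prop := out = abbreviate_description_alt text max_length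
instance (text : String) (max_length : Int) (out : String) : Decidable (Spec_abbreviate_description text max_length out) := by unfold Spec_abbreviate_description; infer_instance

-- ===== CLAIM (what is proved, stated in full; the proofs are below) =====
def Claim_equal_abbreviate_description : Prop := ∀ (text : String) (max_length : Int), Dom_abbreviate_description text max_length → Pre_abbreviate_description text max_length → Spec_abbreviate_description text max_length (abbreviate_description text max_length)

-- ===== LEMMAS AND PROOFS =====

-- clean recursion equal to Python str.replace for a nonempty pattern
def rep1 (old new : List Char) : List Char → List Char
  | [] => []
  | c :: t =>
    if old.isPrefixOf (c :: t) && !old.isEmpty then new ++ rep1 old new (t.drop (old.length - 1))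
    else c :: rep1 old new t
termination_by l => l.length
decreasing_by
  · simp only [List.length_drop, List.length_cons]; omega
  · simp

-- the sequential replacement pipeline of A, over rep1
def compR (tbl : List (List Char × List Char)) (l : List Char) : List Char :=
  tbl.foldl (fun s p => rep1 p.1 p.2 s) l

theorem compR_cons (k v : List Char) (tbl : List (List Char × List Char)) (l : List Char) :
    compR ((k, v) :: tbl) l = compR tbl (rep1 k v l) := rfl

theorem compR_app (t1 t2 : List (List Char × List Char)) (l : List Char) :
    compR (t1 ++ t2) l = compR t2 (compR t1 l) := by
  simp [compR, List.foldl_append]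

theorem compR_nil (tbl : List (List Char × List Char)) : compR tbl [] = [] := by
  induction tbl with
  | nil => rfl
  | cons p rest ih =>
    obtain ⟨k, v⟩ := p
    rw [compR_cons, show rep1 k v [] = [] from by rw [rep1]]
    exact ih

theorem rep1_skip {k : List Char} (v : List Char) {c : Char} {t : List Char}
    (h : ¬ k <+: c :: t) : rep1 k v (c :: t) = c :: rep1 k v t := by
  rw [rep1]
  have hf : k.isPrefixOf (c :: t) = false := by
    rw [← Bool.not_eq_true, List.isPrefixOf_iff_prefix]; exact h
  simp [hf]

theorem rep1_consume {k : List Char} (v : List Char) (x : List Char) (hk : k ≠ []) :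
    rep1 k v (k ++ x) = v ++ rep1 k v x := by
  obtain ⟨c, k', rfl⟩ := List.exists_cons_of_ne_nil hk
  rw [List.cons_append, rep1]
  have hpre : (c :: k').isPrefixOf (c :: (k' ++ x)) = true := by
    rw [List.isPrefixOf_iff_prefix]; exact ⟨x, by simp⟩
  simp only [hpre, List.isEmpty_cons, Bool.not_false, Bool.and_self, if_true]
  congr 1
  rw [show (c :: k').length - 1 = k'.length from by simp, List.drop_left]

theorem not_prefix_append {k s x : List Char} (h1 : ¬ k <+: s) (h2 : ¬ s <+: k) :
    ¬ k <+: s ++ x := by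
  intro h
  rcases List.prefix_or_prefix_of_prefix h (List.prefix_append s x) with h' | h'
  · exact h1 h'
  · exact h2 h'

-- "k never matches starting strictly inside the block a (continued by x)"
def BlockedOn (k a x : List Char) : Prop :=
  ∀ s, s <:+ a → s ≠ [] → ¬ k <+: s ++ x

-- decidable static approximation: every nonempty suffix s of a, except possibly excl,
-- is prefix-incomparable with k
def BlockedBExcept (k a excl : List Char) : Bool :=
  a.tails.all (fun s => s.isEmpty || s == excl || (!k.isPrefixOf s && !s.isPrefixOf k))

theorem blockedOn_of_bexcept {k a excl : List Char} (x : List Char)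
    (hb : BlockedBExcept k a excl = true)
    (hx : excl ≠ [] → ¬ k <+: excl ++ x) : BlockedOn k a x := by
  intro s hs hne
  have hmem : s ∈ a.tails := (List.mem_tails _ _).mpr hs
  have hor := (List.all_eq_true.mp hb) s hmem
  simp only [Bool.or_eq_true, beq_iff_eq, Bool.and_eq_true, Bool.not_eq_true',
    List.isEmpty_iff] at hor
  rcases hor with (h | h) | ⟨h1, h2⟩
  · exact absurd h hne
  · subst h; exact hx hne
  · exact not_prefix_append (fun hc => by simp [List.isPrefixOf_iff_prefix.mpr hc] at h1)
      (fun hc => by simp [List.isPrefixOf_iff_prefix.mpr hc] at h2)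

theorem rep1_block {k : List Char} (v : List Char) {a x : List Char}
    (h : BlockedOn k a x) : rep1 k v (a ++ x) = a ++ rep1 k v x := by
  induction a with
  | nil => simp
  | cons c a' ih =>
    have hnp : ¬ k <+: (c :: a') ++ x := h (c :: a') (List.suffix_refl _) (by simp)
    rw [List.cons_append, rep1_skip v (by simpa using hnp)]
    rw [ih (fun s hs hne => h s (hs.trans (List.suffix_cons c a')) hne)]
    simp

-- S-lemma: a pass whose value is prefix-incomparable with every nonempty suffix of k'
-- cannot create a new match of k' at the front
theorem not_prefix_rep1 {k v : List Char} (hk : k ≠ [])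
    (t : List Char) : ∀ k', (∀ s, s <:+ k' → s ≠ [] → ¬ s <+: v ∧ ¬ v <+: s) →
    k' ≠ [] → ¬ k' <+: t → ¬ k' <+: rep1 k v t := by
  induction t with
  | nil => intro k' _ hne _; simp [rep1]; intro h; exact hne h
  | cons c t0 ih =>
    intro k' hsv hne hnp
    by_cases hpre : k <+: c :: t0
    · obtain ⟨rest, hrest⟩ := hpre
      rw [← hrest, rep1_consume v rest hk]
      intro habs
      rcases List.prefix_or_prefix_of_prefix habs (List.prefix_append v _) with h' | h'
      · exact (hsv k' (List.suffix_refl _) hne).1 h'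
      · exact (hsv k' (List.suffix_refl _) hne).2 h'
    · rw [rep1_skip v hpre]
      intro habs
      obtain ⟨e, k'', rfl⟩ := List.exists_cons_of_ne_nil hne
      rw [List.cons_prefix_cons] at habs
      obtain ⟨rfl, htail⟩ := habs
      by_cases hk'' : k'' = []
      · subst hk''
        exact hnp (by simp)
      · have hnp'' : ¬ k'' <+: t0 := fun h => hnp (List.cons_prefix_cons.mpr ⟨rfl, h⟩)
        exact ih k'' (fun s hs h0 => hsv s (hs.trans ⟨[e], rfl⟩) h0) hk'' hnp'' htail

theorem not_prefix_compR {k' : List Char} (tbl : List (List Char × List Char))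
    (hne : ∀ p ∈ tbl, p.1 ≠ [])
    (hsv : ∀ p ∈ tbl, ∀ s, s <:+ k' → s ≠ [] → ¬ s <+: p.2 ∧ ¬ p.2 <+: s)
    (hk' : k' ≠ []) : ∀ t, ¬ k' <+: t → ¬ k' <+: compR tbl t := by
  induction tbl with
  | nil => intro t h; exact h
  | cons p rest ih =>
    intro t h
    obtain ⟨k, v⟩ := p
    rw [compR_cons]
    exact ih (fun q hq => hne q (by simp [hq])) (fun q hq => hsv q (by simp [hq])) _
      (not_prefix_rep1 (hne (k, v) (by simp)) t k' (hsv (k, v) (by simp)) hk' h)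

-- the static key/value relation used between an earlier entry p and a later entry q
def SV (p q : List Char × List Char) : Prop :=
  ∀ s, s <:+ q.1 → s ≠ q.1 → s ≠ [] → ¬ s <+: p.2 ∧ ¬ p.2 <+: s

def SuffValB (K v : List Char) : Bool :=
  K.tails.all (fun s => s.isEmpty || s == K || (!s.isPrefixOf v && !v.isPrefixOf s))

theorem sv_of_suffValB {p q : List Char × List Char} (h : SuffValB q.1 p.2 = true) : SV p q := by
  intro s hs hsne hne
  have hmem : s ∈ q.1.tails := (List.mem_tails _ _).mpr hs
  have hor := (List.all_eq_true.mp h) s hmem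
  simp only [Bool.or_eq_true, beq_iff_eq, Bool.and_eq_true, Bool.not_eq_true',
    List.isEmpty_iff] at hor
  rcases hor with (h' | h') | ⟨h1, h2⟩
  · exact absurd h' hne
  · exact absurd h' hsne
  · exact ⟨fun hc => by simp [List.isPrefixOf_iff_prefix.mpr hc] at h1,
      fun hc => by simp [List.isPrefixOf_iff_prefix.mpr hc] at h2⟩

-- peel one unmatched character through all passes
theorem compR_cons_eq (tbl : List (List Char × List Char))
    (hne : ∀ p ∈ tbl, p.1 ≠ []) (hpair : tbl.Pairwise SV) :
    ∀ (d : Char) (t' : List Char), (∀ p ∈ tbl, ¬ p.1 <+: d :: t') →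
    compR tbl (d :: t') = d :: compR tbl t' := by
  induction tbl with
  | nil => intro d t' _; rfl
  | cons p rest ih =>
    intro d t' hnp
    obtain ⟨k, v⟩ := p
    rw [List.pairwise_cons] at hpair
    rw [compR_cons, rep1_skip v (hnp (k, v) (by simp))]
    have hnp2 : ∀ q ∈ rest, ¬ q.1 <+: d :: rep1 k v t' := by
      intro q hq habs
      have hq0 : ¬ q.1 <+: d :: t' := hnp q (by simp [hq])
      have hqne : q.1 ≠ [] := hne q (by simp [hq])
      obtain ⟨e, ptl, hq1⟩ := List.exists_cons_of_ne_nil hqne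
      rw [hq1, List.cons_prefix_cons] at habs
      obtain ⟨rfl, htail⟩ := habs
      by_cases hptl : ptl = []
      · subst hptl; exact hq0 (by rw [hq1]; simp)
      · have hsv : ∀ s, s <:+ ptl → s ≠ [] → ¬ s <+: v ∧ ¬ v <+: s := by
          intro s hs h0
          refine hpair.1 q hq s (by rw [hq1]; exact hs.trans ⟨[e], rfl⟩) ?_ h0
          intro hcontr
          have h1 : s.length ≤ ptl.length := hs.length_le
          rw [hcontr, hq1] at h1; simp at h1
        have hnp'' : ¬ ptl <+: t' := fun h => hq0 (by rw [hq1]; exact List.cons_prefix_cons.mpr ⟨rfl, h⟩)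
        exact not_prefix_rep1 (hne (k, v) (by simp)) t' ptl hsv hptl hnp'' htail
    rw [ih (fun q hq => hne q (by simp [hq])) hpair.2 d (rep1 k v t') hnp2, compR_cons]

-- push a whole block a through all passes, given per-split BlockedOn facts
theorem compR_block (tbl : List (List Char × List Char)) (a : List Char) :
    ∀ x, (∀ t1 q t2, tbl = t1 ++ q :: t2 → BlockedOn q.1 a (compR t1 x)) →
    compR tbl (a ++ x) = a ++ compR tbl x := by
  induction tbl with
  | nil => intro x _; rfl
  | cons p rest ih =>
    intro x H
    obtain ⟨k, v⟩ := p
    rw [compR_cons, rep1_block v (show BlockedOn k a x from H [] (k, v) rest rfl), compR_cons]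
    exact ih (rep1 k v x) (fun t1 q t2 heq => H ((k, v) :: t1) q t2 (by simp [heq]))

-- the concrete conflict data
def tKey : List Char := "take care when travelling".toList
def pKey : List Char := "public transport".toList
def akeTail : List Char := "ake care when travelling".toList
def conflictStr : List Char := "public transportake care when travelling".toList

def kkExc (a b : List Char) : List Char := if a = tKey ∧ b = pKey then ['t'] else []

-- static facts about the table, checked by the kernel
theorem table_keys_ne_nil : ∀ p ∈ abbrevTable, p.1 ≠ [] := by decide

theorem table_pairwise : abbrevTable.Pairwise
    (fun p q => SuffValB q.1 p.2 = true ∧ BlockedBExcept q.1 p.2 [] = true ∧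
      BlockedBExcept p.1 q.1 (kkExc p.1 q.1) = true) := by decide

-- helper to read a Pairwise off a split
theorem pairwise_middle {α : Type} {R : α → α → Prop} {l t1 t2 : List α} {p : α}
    (h : l.Pairwise R) (heq : l = t1 ++ p :: t2) :
    (∀ q ∈ t1, R q p) ∧ (∀ q ∈ t2, R p q) ∧ t1.Pairwise R := by
  subst heq
  rw [List.pairwise_append] at h
  obtain ⟨h1, h2, h3⟩ := h
  rw [List.pairwise_cons] at h2
  exact ⟨fun q hq => h3 q hq p (by simp), h2.1, h1⟩

-- findRep: the List-Char-level view of B's per-position matcher, used only in the proofs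
def findRep : List (List Char × List Char) → List Char → Option (List Char × List Char)
  | [], _ => none
  | (k, v) :: rest, l => if k.isPrefixOf l then some (v, l.drop k.length) else findRep rest l

theorem findRep_some_len {tbl : List (List Char × List Char)} {l v r : List Char}
    (hne : ∀ p ∈ tbl, p.1 ≠ []) (h : findRep tbl l = some (v, r)) : r.length < l.length := by
  induction tbl with
  | nil => simp [findRep] at h
  | cons p rest ih =>
    obtain ⟨k, v'⟩ := p
    simp only [findRep] at h
    split at h
    · rename_i hpre
      rw [Option.some.injEq, Prod.mk.injEq] at h
      obtain ⟨rfl, rfl⟩ := h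
      have hk : k ≠ [] := hne (k, v') (by simp)
      have hlen : k.length ≤ l.length := (List.isPrefixOf_iff_prefix.mp hpre).length_le
      have : 0 < k.length := List.length_pos_iff.mpr hk
      simp only [List.length_drop]
      omega
    · exact ih (fun p hp => hne p (by simp [hp])) h

def scanRep (l : List Char) : List Char :=
  match h : findRep abbrevTable l with
  | some (v, r) => v ++ scanRep r
  | none =>
    match l with
    | [] => []
    | c :: t => c :: scanRep t
termination_by l.length
decreasing_by
  · exact findRep_some_len (by decide) h
  · simp

-- findRep characterisations
theorem findRep_none {tbl : List (List Char × List Char)} {l : List Char}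
    (h : findRep tbl l = none) : ∀ p ∈ tbl, ¬ p.1 <+: l := by
  induction tbl with
  | nil => simp
  | cons p rest ih =>
    obtain ⟨k, v⟩ := p
    simp only [findRep] at h
    split at h
    · exact absurd h (by simp)
    · rename_i hpre
      intro q hq
      rcases List.mem_cons.mp hq with rfl | hq'
      · simpa [List.isPrefixOf_iff_prefix] using hpre
      · exact ih h q hq'

theorem findRep_some {tbl : List (List Char × List Char)} {l v r : List Char}
    (h : findRep tbl l = some (v, r)) :
    ∃ t1 k t2, tbl = t1 ++ (k, v) :: t2 ∧ k <+: l ∧ r = l.drop k.length ∧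
      ∀ q ∈ t1, ¬ q.1 <+: l := by
  induction tbl with
  | nil => simp [findRep] at h
  | cons p rest ih =>
    obtain ⟨k0, v0⟩ := p
    simp only [findRep] at h
    split at h
    · rename_i hpre
      rw [Option.some.injEq, Prod.mk.injEq] at h
      obtain ⟨rfl, rfl⟩ := h
      exact ⟨[], k0, rest, by simp, List.isPrefixOf_iff_prefix.mp hpre, rfl, by simp⟩
    · rename_i hpre
      obtain ⟨t1, k, t2, heq, hk, hr, hq⟩ := ih h
      refine ⟨(k0, v0) :: t1, k, t2, by simp [heq], hk, hr, ?_⟩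
      intro q hq'
      rcases List.mem_cons.mp hq' with rfl | hmem
      · simpa [List.isPrefixOf_iff_prefix] using hpre
      · exact hq q hmem

-- scanRep equations
theorem scanRep_eq_match {l v r : List Char} (h : findRep abbrevTable l = some (v, r)) :
    scanRep l = v ++ scanRep r := by
  rw [scanRep]; split
  · rename_i v' r' h'
    rw [h, Option.some.injEq, Prod.mk.injEq] at h'
    obtain ⟨rfl, rfl⟩ := h'
    rfl
  · rename_i h'; rw [h] at h'; exact absurd h' (by simp)

theorem scanRep_nil : scanRep [] = [] := by rw [scanRep]; rfl

theorem scanRep_cons {c : Char} {t : List Char} (h : findRep abbrevTable (c :: t) = none) :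
    scanRep (c :: t) = c :: scanRep t := by
  rw [scanRep]; split
  · rename_i v' r' h'; rw [h] at h'; exact absurd h' (by simp)
  · rfl

-- the invariant carried through the induction: the collision substring is absent
def InvT (l : List Char) : Prop := ¬ conflictStr <:+: l

theorem InvT_of_suffix {l t : List Char} (h : InvT l) (hs : t <:+ l) : InvT t :=
  fun habs => h (habs.trans hs.isInfix)

-- ========== A's pipeline equals the single left-to-right pass, on lists ==========
theorem compR_eq_scanRep : ∀ n l, l.length ≤ n → InvT l → compR abbrevTable l = scanRep l := by
  intro n
  induction n with
  | zero =>
    intro l hl _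
    have : l = [] := List.length_eq_zero_iff.mp (Nat.le_zero.mp hl)
    subst this
    rw [compR_nil, scanRep_nil]
  | succ n ih =>
    intro l hl hinv
    cases h : findRep abbrevTable l with
    | none =>
      cases l with
      | nil => rw [compR_nil, scanRep_nil]
      | cons d t' =>
        have hnp := findRep_none h
        rw [compR_cons_eq abbrevTable table_keys_ne_nil
          (table_pairwise.imp (fun hpq => sv_of_suffValB hpq.1)) d t' hnp]
        rw [ih t' (by simpa using Nat.lt_succ_iff.mp (by simpa using hl))
          (InvT_of_suffix hinv (List.suffix_cons d t'))]
        rw [scanRep_cons h]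
    | some p =>
      obtain ⟨v, r⟩ := p
      obtain ⟨t1, k, t2, heq, hk, hr, hq1⟩ := findRep_some h
      obtain ⟨rr, hrest⟩ := hk
      have hrr : r = rr := by
        rw [hr, ← hrest, List.drop_left]
      subst hrr
      have hkne : k ≠ [] := table_keys_ne_nil (k, v) (by rw [heq]; simp)
      have hklen : 0 < k.length := List.length_pos_iff.mpr hkne
      have hrlen : r.length ≤ n := by
        have : l.length = k.length + r.length := by rw [← hrest]; simp
        omega
      have hrestsuf : r <:+ l := ⟨k, hrest⟩
      have hmid := pairwise_middle table_pairwise heq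
      -- the consume computation
      have hstep : compR abbrevTable l = v ++ compR abbrevTable r := by
        rw [heq, ← hrest]
        -- passes before (k,v) walk over the block k
        have h1 : compR t1 (k ++ r) = k ++ compR t1 r := by
          apply compR_block
          intro t1' q t2' hsplit
          have hqmem : q ∈ t1 := by rw [hsplit]; simp
          have hstat : BlockedBExcept q.1 k (kkExc q.1 k) = true := (hmid.1 q hqmem).2.2
          apply blockedOn_of_bexcept _ hstat
          intro hexc
          unfold kkExc at hexc ⊢
          by_cases hcond : q.1 = tKey ∧ k = pKey
          · rw [if_pos hcond]
            obtain ⟨hq1', hkp⟩ := hcond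
            -- q.1 = 't' :: akeTail; a crossing match would need akeTail at the head of the
            -- processed r, which InvT forbids on the raw r and not_prefix_compR preserves
            have hq1c : q.1 = 't' :: akeTail := by rw [hq1']; rfl
            rw [hq1c]
            intro habs
            rw [show ('t' :: akeTail : List Char) <+: ['t'] ++ compR t1' r ↔
              akeTail <+: compR t1' r from by
                simp [List.cons_prefix_cons]] at habs
            have hnraw : ¬ akeTail <+: r := by
              rintro ⟨z, hz⟩
              apply hinv
              have hpfx : conflictStr <+: l := by
                refine ⟨z, ?_⟩
                rw [show conflictStr = pKey ++ akeTail from by decide, ← hrest, hkp,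
                  List.append_assoc, hz]
              exact hpfx.isInfix
            have hprop : ¬ akeTail <+: compR t1' r := by
              apply not_prefix_compR t1'
                (fun p hp => table_keys_ne_nil p
                  (by rw [heq]; exact List.mem_append_left _ (by rw [hsplit]; exact List.mem_append_left _ hp)))
                ?_ (by decide) r hnraw
              intro p hp s hs hsne
              have hrelp := (pairwise_middle hmid.2.2 hsplit).1 p hp
              have hsvpq : SV p q := sv_of_suffValB hrelp.1
              refine hsvpq s ?_ ?_ hsne
              · rw [hq1c]; exact hs.trans ⟨['t'], rfl⟩
              · intro hcontr
                have h1 : s.length ≤ akeTail.length := hs.length_le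
                rw [hcontr, hq1c] at h1
                simp at h1
            exact hprop habs
          · rw [if_neg hcond] at hexc; exact absurd rfl hexc
        -- passes after (k,v) walk over the value v
        have h2 : ∀ y, compR t2 (v ++ y) = v ++ compR t2 y := by
          intro y
          apply compR_block
          intro t1' q t2' hsplit
          have hqmem : q ∈ t2 := by rw [hsplit]; simp
          exact blockedOn_of_bexcept _ (hmid.2.1 q hqmem).2.1 (fun hc => absurd rfl hc)
        calc compR (t1 ++ (k, v) :: t2) (k ++ r)
            = compR ((k, v) :: t2) (compR t1 (k ++ r)) := compR_app ..
          _ = compR ((k, v) :: t2) (k ++ compR t1 r) := by rw [h1]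
          _ = compR t2 (rep1 k v (k ++ compR t1 r)) := compR_cons ..
          _ = compR t2 (v ++ rep1 k v (compR t1 r)) := by rw [rep1_consume v _ hkne]
          _ = v ++ compR t2 (rep1 k v (compR t1 r)) := h2 _
          _ = v ++ compR ((k, v) :: t2) (compR t1 r) := by rw [compR_cons]
          _ = v ++ compR (t1 ++ (k, v) :: t2) r := by rw [← compR_app]
      rw [hstep, ih r hrlen (InvT_of_suffix hinv hrestsuf), scanRep_eq_match h]

-- bridge: PySem.Chars.replace equals rep1 for a nonempty pattern
theorem go_spec (old new : List Char) (hold : old ≠ []) :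
    ∀ fuel l acc, l.length ≤ fuel →
    PySem.Chars.replace.go old new fuel l acc = acc.reverse ++ rep1 old new l := by
  intro fuel
  induction fuel with
  | zero =>
    intro l acc hl
    have : l = [] := List.length_eq_zero_iff.mp (Nat.le_zero.mp hl)
    subst this
    rw [PySem.Chars.replace.go.eq_def]
    simp [rep1]
  | succ fuel ih =>
    intro l acc hl
    cases l with
    | nil => rw [PySem.Chars.replace.go.eq_def]; simp [rep1]
    | cons c t =>
      rw [PySem.Chars.replace.go.eq_def]
      simp only []
      by_cases hpre : old.isPrefixOf (c :: t)
      · rw [if_pos hpre]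
        have hple := (List.isPrefixOf_iff_prefix.mp hpre).length_le
        have holdlen : 0 < old.length := List.length_pos_iff.mpr hold
        rw [ih _ _ (by simp only [List.length_drop]; simp at hl ⊢; omega)]
        rw [rep1]
        rw [if_pos (by simp [hpre, hold])]
        have hdrop : (c :: t).drop old.length = t.drop (old.length - 1) := by
          cases old with
          | nil => exact absurd rfl hold
          | cons o os => simp
        simp [hdrop]
      · rw [if_neg hpre]
        rw [ih _ _ (by simp at hl ⊢; omega)]
        rw [rep1]
        rw [if_neg (by simp [hpre])]
        simp

theorem replace_eq_rep1 (s old new : List Char) (hold : old ≠ []) :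
    PySem.Chars.replace s old new = rep1 old new s := by
  rw [PySem.Chars.replace]
  rw [if_neg (by simp [List.isEmpty_iff, hold])]
  simpa using go_spec old new hold s.length s [] le_rfl

theorem foldl_replace_eq_compR (tbl : List (List Char × List Char))
    (hne : ∀ p ∈ tbl, p.1 ≠ []) :
    ∀ l, tbl.foldl (fun s p => PySem.Chars.replace s p.1 p.2) l = compR tbl l := by
  induction tbl with
  | nil => intro l; rfl
  | cons p rest ih =>
    intro l
    obtain ⟨k, v⟩ := p
    rw [List.foldl_cons, compR_cons, replace_eq_rep1 l k v (hne (k, v) (by simp))]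
    exact ih (fun q hq => hne q (by simp [hq])) _

-- ========== B's port computes scanRep ==========
theorem tryKeys_map (tbl : List (String × String)) (l : List Char) :
    tryKeys tbl l =
      (findRep (tbl.map (fun p => (p.1.toList, p.2.toList))) l).map
        (fun p => (String.ofList p.1, p.2)) := by
  induction tbl with
  | nil => rfl
  | cons p rest ih =>
    obtain ⟨full, abbr⟩ := p
    simp only [tryKeys, List.map_cons, findRep]
    split
    · simp
    · exact ih

theorem abbrevTable_eq_map : abbrevTable = bTable.map (fun p => (p.1.toList, p.2.toList)) := by
  decide

theorem scanGo_eq : ∀ n l acc, l.length ≤ n → scanGo l acc = acc.reverse ++ scanRep l := by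
  intro n
  induction n with
  | zero =>
    intro l acc hl
    have : l = [] := List.length_eq_zero_iff.mp (Nat.le_zero.mp hl)
    subst this
    rw [scanGo, scanRep_nil]
    split
    · rename_i a r h'
      rw [show tryKeys bTable [] = none from by decide] at h'
      exact absurd h' (by simp)
    · show acc.reverse = acc.reverse ++ []
      simp
  | succ n ih =>
    intro l acc hl
    have hbr : tryKeys bTable l =
        (findRep abbrevTable l).map (fun p => (String.ofList p.1, p.2)) := by
      rw [tryKeys_map, ← abbrevTable_eq_map]
    cases h : findRep abbrevTable l with
    | none =>
      have htk : tryKeys bTable l = none := by rw [hbr, h]; rfl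
      rw [scanGo]
      split
      · rename_i a r h'; rw [htk] at h'; exact absurd h' (by simp)
      · cases l with
        | nil =>
          rw [scanRep_nil]
          show acc.reverse = acc.reverse ++ []
          simp
        | cons c t =>
          show scanGo t (c :: acc) = acc.reverse ++ scanRep (c :: t)
          rw [ih t (c :: acc) (by simpa using Nat.lt_succ_iff.mp (by simpa using hl)),
            scanRep_cons h]
          simp
    | some p =>
      obtain ⟨v, r⟩ := p
      have htk : tryKeys bTable l = some (String.ofList v, r) := by rw [hbr, h]; rfl
      have hrl : r.length ≤ n :=
        Nat.lt_succ_iff.mp (Nat.lt_of_lt_of_le (findRep_some_len table_keys_ne_nil h) hl)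
      rw [scanGo]
      split
      · rename_i a r' h'
        rw [htk, Option.some.injEq, Prod.mk.injEq] at h'
        obtain ⟨rfl, rfl⟩ := h'
        rw [ih r _ hrl, scanRep_eq_match h]
        simp
      · rename_i h'; rw [htk] at h'; exact absurd h' (by simp)

-- the manual while-loop rstrip equals Python's rstrip
theorem rstripLoop_rev (m : List Char) :
    rstripLoop m.reverse = (m.dropWhile PySem.Chars.isspace).reverse := by
  induction m with
  | nil => rw [rstripLoop]; rfl
  | cons c t ih =>
    rw [List.reverse_cons, rstripLoop]
    split
    · rename_i d hd
      rw [List.getLast?_concat, Option.some.injEq] at hd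
      subst hd
      by_cases hsp : PySem.Chars.isspace c = true
      · rw [if_pos hsp, List.dropLast_concat, ih, List.dropWhile_cons, if_pos hsp]
      · rw [if_neg hsp, List.dropWhile_cons, if_neg hsp, List.reverse_cons]
    · rename_i hd
      rw [List.getLast?_concat] at hd
      exact absurd hd (by simp)

theorem rstripLoop_eq (l : List Char) : rstripLoop l = PySem.Chars.rstrip l := by
  have := rstripLoop_rev l.reverse
  rw [List.reverse_reverse] at this
  rw [this, PySem.Chars.rstrip]

-- ===== VERDICT (by name: the statement is the Claim_ definition above) =====
theorem abbreviate_description_spec : Claim_equal_abbreviate_description := by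
  intro text max_length _ hpre
  unfold Spec_abbreviate_description abbreviate_description abbreviate_description_alt
  have hinv : InvT text.toList := by
    intro habs
    have := PySem.Str.isIn_iff_infix (sub := "public transportake care when travelling") (s := text)
    rw [hpre] at this
    simp at this
    exact this habs
  have hA : abbrevTable.foldl (fun s p => PySem.Chars.replace s p.1 p.2) text.toList
      = scanRep text.toList := by
    rw [foldl_replace_eq_compR abbrevTable table_keys_ne_nil]
    exact compR_eq_scanRep text.toList.length text.toList le_rfl hinv
  have hB : scanGo text.toList [] = scanRep text.toList := by
    simpa using scanGo_eq text.toList.length text.toList [] le_rfl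
  rw [hA, hB]
  simp only [rstripLoop_eq]
  rfl
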